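-- pv_equiv track=rewrite | github.com/work82mj/coding-interview | problems/haker_rank/recursive_digit_sum.py | superDigit2
-- ===== SOURCE A (Python) =====
-- def superDigit(n, k):
--     ret = 0
--     for s in str(n):
--         ret += int(s)
--     ret *= k
--
--     while ret >= 10:
--         tmp_ret = 0
--         for s in str(ret):
--             tmp_ret += int(s)
--         ret = tmp_ret
--     return ret
--
-- def superDigit2(n, k):
--     ret = 0
--     for s in str(n):
--         ret += int(s)
--     ret *= k
--     if ret < 10:
--         return ret
--
--     return superDigit(ret, 1)
-- ===== SOURCE B (Python) =====
-- def superDigit2(n, k):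
--     v = sum(int(c) for c in str(n)) * k
--     return v if v < 10 else 1 + (v - 1) % 9
-- ===== Notes on version B (the rewrite author's own statement) =====
-- stated objective: simpler
-- what changed: The iterative repeated digit-sum reduction (the helper superDigit's while-loop that re-stringifies and re-sums until the value drops below 10) is replaced by the closed-form digital root 1 + (v - 1) % 9 applied once to the digit-sum-times-k product; the initial digit-sum pass over str(n) is kept.
import Mathlib
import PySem

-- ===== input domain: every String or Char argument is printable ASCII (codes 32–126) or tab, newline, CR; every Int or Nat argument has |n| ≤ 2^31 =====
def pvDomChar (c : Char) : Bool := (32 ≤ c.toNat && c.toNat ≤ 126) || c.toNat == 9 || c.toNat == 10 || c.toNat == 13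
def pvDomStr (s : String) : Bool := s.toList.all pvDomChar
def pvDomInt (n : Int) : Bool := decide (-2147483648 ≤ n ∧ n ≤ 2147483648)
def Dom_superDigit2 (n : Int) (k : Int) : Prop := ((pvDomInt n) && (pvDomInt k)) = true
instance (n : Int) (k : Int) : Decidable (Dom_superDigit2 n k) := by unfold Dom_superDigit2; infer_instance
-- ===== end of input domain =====

-- B replaces A's iterative repeated digit-summing (superDigit's while-loop) by the
-- closed-form digital root 1 + (v-1) % 9; objective: simpler.

-- ===== PORT A =====
-- int(c) for a single character c (raises → none; Pre_ keeps every character a digit)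
def pvIntOfChar (c : Char) : Int := (PySem.Int.ofStr? (String.mk [c])).getD 0

-- 'ret = 0; for s in str(m): ret += int(s)' — the digit-sum pass A performs twice
def pvDigitSumA (m : Int) : Int :=
  (PySem.Int.toStr m).toList.foldl (fun a c => a + pvIntOfChar c) 0

-- 'while ret >= 10: ret = digit sum of str(ret)' — fuel-bounded (fuel only makes the
-- recursion structural; pvSDLoop_eq below shows r.toNat fuel always suffices)
def pvSDLoop : Nat → Int → Int
  | 0, r => r
  | f + 1, r => if r ≥ 10 then pvSDLoop f (pvDigitSumA r) else r

def superDigit (n : Int) (k : Int) : Int :=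
  let ret := pvDigitSumA n * k
  pvSDLoop ret.toNat ret

def superDigit2 (n : Int) (k : Int) : Int :=
  let ret := pvDigitSumA n * k
  if ret < 10 then ret else superDigit ret 1

-- ===== PORT B =====
def superDigit2_alt (n : Int) (k : Int) : Int :=
  let v := ((PySem.Int.toStr n).toList.map pvIntOfChar).sum * k
  if v < 10 then v else 1 + PySem.Int.mod (v - 1) 9

-- ===== PRECONDITION & SPEC =====
-- Pre_ excludes n < 0, where str(n) starts with '-' and int('-') raises ValueError in both A and B.
def Pre_superDigit2 (n : Int) (k : Int) : Prop := 0 ≤ n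
instance (n : Int) (k : Int) : Decidable (Pre_superDigit2 n k) := by unfold Pre_superDigit2; infer_instance
def pvWitness_superDigit2 : Int × Int := (9875, 4)

def Spec_superDigit2 (n : Int) (k : Int) (out : Int) : Prop := out = superDigit2_alt n k
instance (n : Int) (k : Int) (out : Int) : Decidable (Spec_superDigit2 n k out) := by unfold Spec_superDigit2; infer_instance

-- ===== CLAIM (what is proved, stated in full; the proofs are below) =====
def Claim_equal_superDigit2 : Prop := ∀ (n : Int) (k : Int), Dom_superDigit2 n k → Pre_superDigit2 n k → Spec_superDigit2 n k (superDigit2 n k)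

-- ===== LEMMAS AND PROOFS =====

-- int(digitChar d) = d for decimal digits
lemma pvIntOfChar_digitChar (d : Nat) (h : d < 10) : pvIntOfChar (Nat.digitChar d) = d := by
  interval_cases d <;> decide

-- the char-fold accumulates the sum of the mapped values
lemma pvFoldl_eq_sum (cs : List Char) (a : Int) :
    cs.foldl (fun a c => a + pvIntOfChar c) a = a + (cs.map pvIntOfChar).sum := by
  induction cs generalizing a with
  | nil => simp
  | cons c cs ih => simp [List.foldl_cons, ih (a + pvIntOfChar c)]; ring

-- summing the chars Nat.toDigitsCore produces = summing Nat.digits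
lemma pvCoreSum (m : Nat) : ∀ (f : Nat) (ds : List Char), m < f →
    ((Nat.toDigitsCore 10 f m ds).map pvIntOfChar).sum
      = ((Nat.digits 10 m).sum : Int) + (ds.map pvIntOfChar).sum := by
  induction m using Nat.strong_induction_on with
  | _ m ih =>
    intro f ds hf
    match f with
    | f + 1 =>
      rw [Nat.toDigitsCore]
      by_cases h0 : m / 10 = 0
      · simp only [h0]
        have hm10 : m < 10 := by omega
        rcases Nat.eq_zero_or_pos m with hm | hm
        · subst hm; simp [pvIntOfChar_digitChar 0 (by omega)]
        · rw [Nat.digits_def' (by norm_num : 1 < 10) hm]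
          simp [h0, Nat.mod_eq_of_lt hm10,
            pvIntOfChar_digitChar m hm10]
      · rw [if_neg h0]
        have hmpos : 0 < m := by omega
        have hlt : m / 10 < m := Nat.div_lt_self hmpos (by norm_num)
        rw [ih (m / 10) hlt f (Nat.digitChar (m % 10) :: ds) (by omega)]
        rw [Nat.digits_def' (by norm_num : 1 < 10) hmpos]
        simp [pvIntOfChar_digitChar (m % 10) (Nat.mod_lt m (by norm_num))]
        ring

-- A's digit-sum pass equals the sum of Nat.digits (for nonnegative input)
lemma pvDigitSumA_eq (m : Int) (h : 0 ≤ m) :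
    pvDigitSumA m = ((Nat.digits 10 m.toNat).sum : Int) := by
  unfold pvDigitSumA
  rw [PySem.Int.toList_toStr]
  unfold PySem.Int.toChars
  rw [if_neg (by omega)]
  rw [pvFoldl_eq_sum]
  unfold Nat.toDigits
  rw [pvCoreSum m.toNat (m.toNat + 1) [] (by omega)]
  simp

-- digit-sum bounds
lemma pvDsum_le (m : Nat) : (Nat.digits 10 m).sum ≤ m := by
  induction m using Nat.strong_induction_on with
  | _ m ih =>
    rcases Nat.eq_zero_or_pos m with hm | hm
    · simp [hm]
    · rw [Nat.digits_def' (by norm_num : 1 < 10) hm]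
      have h1 : m / 10 < m := Nat.div_lt_self hm (by norm_num)
      have := ih (m / 10) h1
      have := Nat.mod_lt m (show 0 < 10 by norm_num)
      simp only [List.sum_cons]
      omega

lemma pvDsum_lt (m : Nat) (h : 10 ≤ m) : (Nat.digits 10 m).sum < m := by
  rw [Nat.digits_def' (by norm_num : 1 < 10) (by omega)]
  have h1 : m / 10 < m := Nat.div_lt_self (by omega) (by norm_num)
  have := pvDsum_le (m / 10)
  have := Nat.mod_lt m (show 0 < 10 by norm_num)
  simp only [List.sum_cons]
  omega

lemma pvDsum_pos (m : Nat) (h : 1 ≤ m) : 1 ≤ (Nat.digits 10 m).sum := by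
  induction m using Nat.strong_induction_on with
  | _ m ih =>
    rw [Nat.digits_def' (by norm_num : 1 < 10) (by omega)]
    simp only [List.sum_cons]
    by_cases h0 : m % 10 = 0
    · have hd : 1 ≤ m / 10 := by omega
      have := ih (m / 10) (Nat.div_lt_self (by omega) (by norm_num)) hd
      omega
    · omega

-- digit sum is congruent mod 9 (Int level)
lemma pvDsum_mod9 (m : Int) (h : 0 ≤ m) :
    (((Nat.digits 10 m.toNat).sum : Int) - 1) % 9 = (m - 1) % 9 := by
  have hN : (Nat.digits 10 m.toNat).sum % 9 = m.toNat % 9 :=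
    (Nat.modEq_nine_digits_sum m.toNat).symm
  have hI : ((Nat.digits 10 m.toNat).sum : Int) % 9 = ((m.toNat : Int)) % 9 := by
    omega
  have hm : ((m.toNat : Int)) = m := by omega
  rw [hm] at hI
  omega

-- the while-loop computes the digital root whenever fuel ≥ r.toNat
lemma pvSDLoop_eq (f : Nat) : ∀ (r : Int), 1 ≤ r → r.toNat ≤ f →
    pvSDLoop f r = 1 + (r - 1) % 9 := by
  induction f with
  | zero => intro r h1 h2; omega
  | succ f ih =>
    intro r h1 h2
    rw [pvSDLoop]
    by_cases h10 : r ≥ 10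
    · rw [if_pos h10]
      have hr0 : 0 ≤ r := by omega
      rw [pvDigitSumA_eq r hr0]
      set s : Nat := (Nat.digits 10 r.toNat).sum with hs
      have hs1 : 1 ≤ s := pvDsum_pos r.toNat (by omega)
      have hslt : s < r.toNat := pvDsum_lt r.toNat (by omega)
      rw [ih (s : Int) (by exact_mod_cast hs1) (by omega)]
      rw [pvDsum_mod9 r hr0]
    · rw [if_neg h10]
      have h9 : (r - 1) % 9 = r - 1 := Int.emod_eq_of_lt (by omega) (by omega)
      omega

-- ===== VERDICT (by name: the statement is the Claim_ definition above) =====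
theorem superDigit2_spec : Claim_equal_superDigit2 := by
  intro n k _hdom hpre
  unfold Spec_superDigit2 superDigit2 superDigit2_alt superDigit
  have hv : pvDigitSumA n = ((PySem.Int.toStr n).toList.map pvIntOfChar).sum := by
    unfold pvDigitSumA
    rw [pvFoldl_eq_sum]
    ring
  rw [← hv]
  set v := pvDigitSumA n * k with hvdef
  by_cases hlt : v < 10
  · simp [hlt]
  · simp only [if_neg hlt, mul_one]
    have hv10 : 10 ≤ v := by omega
    have hv0 : 0 ≤ v := by omega
    rw [pvDigitSumA_eq v hv0]
    set s : Nat := (Nat.digits 10 v.toNat).sum with hs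
    have hs1 : 1 ≤ s := pvDsum_pos v.toNat (by omega)
    rw [pvSDLoop_eq (Int.toNat (s : Int)) (s : Int) (by exact_mod_cast hs1) (le_refl _)]
    rw [pvDsum_mod9 v hv0]
    rw [PySem.Int.mod_eq_emod_of_pos (by norm_num : (0:Int) < 9)]
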